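-- pv_equiv track=rewrite | github.com/vkd225/grokking-coding | companies/un_domains.py | getLargestWord
-- ===== SOURCE A (Python) =====
-- DICTIONARY_WORDS = [ 'a', 'about', 'all', 'an', 'and', 'angel', 'are', 'as', 'at', 'be', 'but',
-- 'by', 'can', 'do', 'dog', 'exchange', 'for', 'form', 'free', 'from', 'has', 'have', 'home', 'hope',
-- 'if', 'in', 'info', 'information', 'is', 'it', 'life', 'more', 'my', 'new', 'no', 'not', 'of', 'on',
-- 'one', 'or', 'other', 'our', 'page', 'search', 'that', 'the', 'this', 'to', 'us', 'was', 'we', 'will',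
-- 'with', 'you', 'your']
--
-- def getLargestWord(phrase):
--
--   output = []
--
--   for i, word in enumerate(DICTIONARY_WORDS):
--     if word in phrase:
--       output.append(word)
--
--   max_len = 0
--   largest_word = ""
--
--   for w in output:
--     if len(w) > max_len:
--       max_len = len(w)
--       largest_word = w
--
--   return largest_word
-- ===== SOURCE B (Python) =====
-- _BY_LEN_DESC = sorted(
--     "a about all an and angel are as at be but by can do dog exchange for form "
--     "free from has have home hope if in info information is it life more my new "
--     "no not of on one or other our page search that the this to us was we will "
--     "with you your".split(),
--     key=len, reverse=True)
--
-- def getLargestWord(phrase):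
--   # first substring hit in a stable length-descending word order is the longest
--   # match, earliest in DICTIONARY_WORDS order among equal lengths
--   for word in _BY_LEN_DESC:
--     if word in phrase:
--       return word
--   return ""
-- ===== Notes on version B (the rewrite author's own statement) =====
-- stated objective: alternative
-- what changed: Replaces the filter-all-matches pass plus argmax pass with a word list pre-sorted stably by descending length (built once at module load from a split word string) and a single scan returning the first word contained in the phrase.
import Mathlib
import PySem

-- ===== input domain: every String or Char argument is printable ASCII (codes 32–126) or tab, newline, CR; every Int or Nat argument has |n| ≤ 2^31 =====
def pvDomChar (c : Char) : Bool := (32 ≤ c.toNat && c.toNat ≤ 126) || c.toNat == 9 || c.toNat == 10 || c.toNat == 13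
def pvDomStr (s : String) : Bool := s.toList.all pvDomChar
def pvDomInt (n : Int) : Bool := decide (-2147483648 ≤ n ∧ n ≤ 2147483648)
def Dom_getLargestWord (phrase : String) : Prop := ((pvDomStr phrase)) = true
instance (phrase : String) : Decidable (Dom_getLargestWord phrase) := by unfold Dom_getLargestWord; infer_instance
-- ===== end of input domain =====

-- B replaces A's filter-then-argmax two-pass scan over the word list with a word
-- list pre-sorted stably by descending length and a single first-match scan
-- (alternative decomposition, early exit).

-- ===== PORT A =====
def dictWords : List String := ["a", "about", "all", "an", "and", "angel", "are", "as", "at", "be", "but",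
  "by", "can", "do", "dog", "exchange", "for", "form", "free", "from", "has", "have", "home", "hope",
  "if", "in", "info", "information", "is", "it", "life", "more", "my", "new", "no", "not", "of", "on",
  "one", "or", "other", "our", "page", "search", "that", "the", "this", "to", "us", "was", "we", "will",
  "with", "you", "your"]

def getLargestWord (phrase : String) : String :=
  let output := dictWords.foldl (fun acc w => if PySem.Str.isIn w phrase then acc ++ [w] else acc) []
  (output.foldl (fun (s : Int × String) w => if PySem.Str.len w > s.1 then (PySem.Str.len w, w) else s)
    ((0 : Int), "")).2

-- ===== PORT B =====
-- Source B's module-level word text and its stable length-descending sort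
def dictText : String := "a about all an and angel are as at be but by can do dog exchange for form free from has have home hope if in info information is it life more my new no not of on one or other our page search that the this to us was we will with you your"

def byLenDesc : List String :=
  PySem.List.sorted (PySem.Str.split₀ dictText) (fun w => PySem.Str.len w) true

def getLargestWord_alt (phrase : String) : String :=
  match byLenDesc.find? (fun w => PySem.Str.isIn w phrase) with
  | some w => w
  | none => ""

-- ===== PRECONDITION & SPEC =====
def Spec_getLargestWord (phrase : String) (out : String) : Prop := out = getLargestWord_alt phrase
instance (phrase : String) (out : String) : Decidable (Spec_getLargestWord phrase out) := by unfold Spec_getLargestWord; infer_instance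

-- ===== CLAIM (what is proved, stated in full; the proofs are below) =====
def Claim_equal_getLargestWord : Prop := ∀ (phrase : String), Dom_getLargestWord phrase → Spec_getLargestWord phrase (getLargestWord phrase)

-- ===== LEMMAS AND PROOFS =====

-- A's argmax step
def pvStep : Int × String → String → Int × String :=
  fun s w => if PySem.Str.len w > s.1 then (PySem.Str.len w, w) else s

-- the distinct word lengths of dictWords, descending
def pvLens : List Int := [11, 8, 6, 5, 4, 3, 2, 1]

lemma pvA_eq (phrase : String) :
    getLargestWord phrase
      = (((dictWords.filter (fun w => PySem.Str.isIn w phrase)).foldl pvStep ((0 : Int), ""))).2 := by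
  unfold getLargestWord
  rw [PySem.List.foldl_append_if (fun w => PySem.Str.isIn w phrase) (fun w => w) dictWords []]
  rw [List.nil_append, List.map_id']
  rfl

-- B's pre-sorted list groups dictWords by length, largest first
set_option maxRecDepth 8000 in
lemma pvSorted_eq :
    byLenDesc
      = (pvLens.map (fun k => dictWords.filter (fun w => PySem.Str.len w == k))).flatten := by
  decide

lemma pvFold_fixed (M : List String) (acc : Int × String)
    (h : ∀ w ∈ M, PySem.Str.len w ≤ acc.1) : M.foldl pvStep acc = acc := by
  induction M with
  | nil => rfl
  | cons w M ih =>
    have hw := h w (by simp)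
    rw [List.foldl_cons, show pvStep acc w = acc from by unfold pvStep; rw [if_neg (by omega)]]
    exact ih (fun v hv => h v (by simp [hv]))

lemma pvFold_first (k : Int) (p : String → Bool) (L : List String) :
    ∀ (acc : Int × String) (m : String), acc.1 < k →
    (∀ w ∈ L, p w = true → PySem.Str.len w ≤ k) →
    L.find? (fun w => p w && (PySem.Str.len w == k)) = some m →
    ((L.filter p).foldl pvStep acc).2 = m := by
  induction L with
  | nil => intro acc m _ _ hf; simp at hf
  | cons w L ih =>
    intro acc m hacc hb hf
    by_cases hp : p w = true
    · by_cases hk : PySem.Str.len w = k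
      · have hm : w = m := by
          rw [List.find?_cons_of_pos (by simp only [hp, hk, Bool.true_and, beq_self_eq_true])] at hf
          exact Option.some_inj.mp hf
        subst hm
        rw [List.filter_cons_of_pos hp, List.foldl_cons,
          show pvStep acc w = (PySem.Str.len w, w) from by unfold pvStep; rw [if_pos (by omega)]]
        rw [pvFold_fixed _ _ (fun v hv => by
          have := hb v (List.mem_cons_of_mem w (List.mem_of_mem_filter hv)) (List.of_mem_filter hv)
          omega)]
      · rw [List.find?_cons_of_neg (by simp only [hp, Bool.true_and, beq_iff_eq]; exact (by simpa using hk))] at hf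
        have hlt : PySem.Str.len w < k :=
          lt_of_le_of_ne (hb w (by simp) hp) hk
        rw [List.filter_cons_of_pos hp, List.foldl_cons]
        have hacc' : (pvStep acc w).1 < k := by
          unfold pvStep; split
          · exact hlt
          · exact hacc
        exact ih _ m hacc' (fun v hv hpv => hb v (by simp [hv]) hpv) hf
    · rw [List.find?_cons_of_neg (by simp only [hp, Bool.false_and]; exact Bool.false_ne_true)] at hf
      rw [List.filter_cons_of_neg (by simpa using hp)]
      exact ih acc m hacc (fun v hv hpv => hb v (by simp [hv]) hpv) hf

lemma pvFind_filter (k : Int) (p : String → Bool) (L : List String) :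
    (L.filter (fun w => PySem.Str.len w == k)).find? p
      = L.find? (fun w => p w && (PySem.Str.len w == k)) := by
  rw [List.find?_filter]
  congr 1
  funext w
  cases hp : p w <;> cases hk : (PySem.Str.len w == k) <;> simp_all

lemma pvCore (p : String → Bool) :
    ∀ (lens : List Int) (L : List String),
    lens.Pairwise (· > ·) → (∀ k ∈ lens, (0:Int) < k) →
    (∀ w ∈ L, p w = true → PySem.Str.len w ∈ lens) →
    ((((lens.map (fun k => L.filter (fun w => PySem.Str.len w == k))).flatten).find? p).getD "")
      = ((L.filter p).foldl pvStep ((0 : Int), "")).2 := by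
  intro lens
  induction lens with
  | nil =>
    intro L _ _ hmem
    have hnil : L.filter p = [] := by
      rw [List.filter_eq_nil_iff]
      intro w hw hpw
      exact absurd (hmem w hw hpw) (by simp)
    rw [hnil]; rfl
  | cons k ks ih =>
    intro L hpw hpos hmem
    simp only [List.map_cons, List.flatten_cons, List.find?_append]
    rw [pvFind_filter]
    cases hf : L.find? (fun w => p w && (PySem.Str.len w == k)) with
    | some m =>
      rw [Option.some_or, Option.getD_some]
      exact (pvFold_first k p L ((0:Int), "") m (hpos k (by simp))
        (fun w hw hpw' => by
          have hin := hmem w hw hpw'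
          simp only [List.mem_cons] at hin
          rcases hin with h | h
          · omega
          · have := (List.pairwise_cons.mp hpw).1 _ h; omega) hf).symm
    | none =>
      rw [Option.none_or]
      have hnone := List.find?_eq_none.mp hf
      exact ih L (List.pairwise_cons.mp hpw).2 (fun k' hk' => hpos k' (by simp [hk']))
        (fun w hw hpw' => by
          have hin := hmem w hw hpw'
          simp only [List.mem_cons] at hin
          rcases hin with h | h
          · exfalso
            have hcontr := hnone w hw
            simp only [hpw', Bool.true_and, beq_iff_eq] at hcontr
            exact hcontr h
          · exact h)

lemma pvDict_lens : ∀ w ∈ dictWords, PySem.Str.len w ∈ pvLens := by decide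

-- ===== VERDICT (by name: the statement is the Claim_ definition above) =====
theorem getLargestWord_spec : Claim_equal_getLargestWord := by
  intro phrase _
  unfold Spec_getLargestWord getLargestWord_alt
  rw [pvSorted_eq, pvA_eq]
  rw [← pvCore (fun w => PySem.Str.isIn w phrase) pvLens dictWords
        (by decide) (by decide) (fun w hw _ => pvDict_lens w hw)]
  cases ((pvLens.map (fun k => dictWords.filter (fun w => PySem.Str.len w == k))).flatten).find?
      (fun w => PySem.Str.isIn w phrase) <;> rfl
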